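-- pv_equiv track=rewrite | github.com/Shivaatgit366/Small_Projects_and_Practice_problems | practice_problems_and_small_projects/number_present_in_the_series.py | is_part_of_series
-- ===== SOURCE A (Python) =====
-- formula_lookups = {}
--
-- def formula(num: int):
--     if num < 0:
--         raise ValueError("don't give negative numbers")
--
--     if num in formula_lookups:
--         return formula_lookups[num]
--
--     if num == 0:
--         ans = 0
--     elif num == 1:
--         ans = 1
--     else:
--         ans = 9 * formula(num - 1) - 11 * formula(num - 2)
--
--     formula_lookups[num] = ans
--     return ans
--
-- def is_part_of_series(lst):
--     sorted_list = sorted(lst)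
--     x = 0
--     for number in sorted_list:
--         while True:
--             answer = formula(x)
--             if answer == number:
--                 break
--             if answer > number:
--                 return False
--             x = x + 1
--     return True
-- ===== SOURCE B (Python) =====
-- def _is_term(n):
--     a, b = 0, 1
--     while a < n:
--         a, b = b, 9 * b - 11 * a
--     return a == n
--
-- def is_part_of_series(lst):
--     return all(_is_term(n) for n in lst)
-- ===== Notes on version B (the rewrite author's own statement) =====
-- stated objective: simpler
-- what changed: Replaces the sort + persistent-cursor forward scan over a recursive memoized recurrence with a per-element iterative pair-stepping (a,b = b, 9*b-11*a) membership test combined with all().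
import Mathlib
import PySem

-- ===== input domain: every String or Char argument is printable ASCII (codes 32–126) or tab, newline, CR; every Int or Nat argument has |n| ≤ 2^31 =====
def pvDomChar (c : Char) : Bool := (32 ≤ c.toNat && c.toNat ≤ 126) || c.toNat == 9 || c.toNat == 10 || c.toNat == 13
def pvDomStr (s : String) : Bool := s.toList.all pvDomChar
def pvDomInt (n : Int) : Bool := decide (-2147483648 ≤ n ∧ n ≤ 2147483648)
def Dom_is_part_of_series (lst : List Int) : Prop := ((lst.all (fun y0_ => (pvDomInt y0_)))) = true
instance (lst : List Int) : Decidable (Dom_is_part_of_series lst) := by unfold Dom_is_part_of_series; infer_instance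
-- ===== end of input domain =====

-- B replaces A's sort + persistent-cursor scan over a recursive memoized formula by a
-- per-element iterative pair-stepping membership test (objective: simpler; no speed claim).

-- ===== PORT A =====
-- Python's memo dict only caches results; the recurrence itself is ported.
def formula : Nat → Int
  | 0 => 0
  | 1 => 1
  | n + 2 => 9 * formula (n + 1) - 11 * formula n

-- invariant of the series, needed for the termination of A's while-loop (and B's)
theorem formula_inv : ∀ i : Nat, 0 ≤ formula i ∧ 7 * formula i < formula (i + 1)
  | 0 => by simp [formula]
  | i + 1 => by
    have h := formula_inv i
    have e : formula (i + 1 + 1) = 9 * formula (i + 1) - 11 * formula i := rfl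
    omega

theorem formula_lt_succ (i : Nat) : formula i < formula (i + 1) := by
  have := formula_inv i; omega

-- A's inner 'while True' loop: returns the cursor where it breaks, none = 'return False'
def aWhile (number : Int) (x : Nat) : Option Nat :=
  let answer := formula x
  if answer = number then some x
  else if answer > number then none
  else aWhile number (x + 1)
termination_by (number - formula x).toNat
decreasing_by
  have h1 := formula_lt_succ x
  omega

-- A's for-loop over the sorted list, carrying the persistent cursor x
def aScan : List Int → Nat → Bool
  | [], _ => true
  | number :: rest, x =>
    match aWhile number x with
    | none => false
    | some x' => aScan rest x'

def is_part_of_series (lst : List Int) : Bool :=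
  aScan (PySem.List.sorted lst (fun v => v) false) 0

-- ===== PORT B =====
-- B's 'while a < n' loop over the pair (a, b) of consecutive terms; the two proof
-- arguments are termination evidence only (the loop invariant of the pair).
def bLoop (n a b : Int) (ha : 0 ≤ a) (hab : 7 * a < b) : Bool :=
  if a < n then bLoop n b (9 * b - 11 * a) (by omega) (by omega)
  else a == n
termination_by (n - a).toNat
decreasing_by omega

def is_part_of_series_alt (lst : List Int) : Bool :=
  lst.all (fun n => bLoop n 0 1 (by norm_num) (by norm_num))

-- ===== PRECONDITION & SPEC =====
def Spec_is_part_of_series (lst : List Int) (out : Bool) : Prop := out = is_part_of_series_alt lst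
instance (lst : List Int) (out : Bool) : Decidable (Spec_is_part_of_series lst out) := by unfold Spec_is_part_of_series; infer_instance

-- ===== CLAIM (what is proved, stated in full; the proofs are below) =====
def Claim_equal_is_part_of_series : Prop := ∀ (lst : List Int), Dom_is_part_of_series lst → Spec_is_part_of_series lst (is_part_of_series lst)

-- ===== LEMMAS AND PROOFS =====

theorem formula_strictMono : StrictMono formula :=
  strictMono_nat_of_lt_succ formula_lt_succ

theorem bLoop_congr (n a a' b b' : Int) (ha : 0 ≤ a) (hab : 7 * a < b)
    (ha' : 0 ≤ a') (hab' : 7 * a' < b') (ea : a = a') (eb : b = b') :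
    bLoop n a b ha hab = bLoop n a' b' ha' hab' := by
  subst ea; subst eb; rfl

theorem bLoop_iff : ∀ (k : Nat) (n : Int) (i : Nat), (n - formula i).toNat ≤ k →
    (bLoop n (formula i) (formula (i + 1)) (formula_inv i).1 (formula_inv i).2 = true ↔
      ∃ j, i ≤ j ∧ formula j = n) := by
  intro k
  induction k with
  | zero =>
    intro n i hk
    have hle : n ≤ formula i := by omega
    rw [bLoop]
    have hnlt : ¬ (formula i < n) := by omega
    simp only [if_neg hnlt, beq_iff_eq]
    constructor
    · intro h; exact ⟨i, le_refl i, h⟩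
    · rintro ⟨j, hj, he⟩
      have := formula_strictMono.monotone hj
      omega
  | succ k ih =>
    intro n i hk
    by_cases hlt : formula i < n
    · rw [bLoop]
      simp only [if_pos hlt]
      have e : (9 * formula (i + 1) - 11 * formula i) = formula (i + 2) := rfl
      rw [bLoop_congr n (formula (i + 1)) (formula (i + 1))
            (9 * formula (i + 1) - 11 * formula i) (formula (i + 2))
            _ _ (formula_inv (i + 1)).1 (formula_inv (i + 1)).2 rfl e]
      have hk' : (n - formula (i + 1)).toNat ≤ k := by
        have := formula_lt_succ i; omega
      rw [ih n (i + 1) hk']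
      constructor
      · rintro ⟨j, hj, he⟩; exact ⟨j, by omega, he⟩
      · rintro ⟨j, hj, he⟩
        have hne : j ≠ i := by rintro rfl; omega
        exact ⟨j, by omega, he⟩
    · rw [bLoop]
      simp only [if_neg hlt, beq_iff_eq]
      constructor
      · intro h; exact ⟨i, le_refl i, h⟩
      · rintro ⟨j, hj, he⟩
        have := formula_strictMono.monotone hj
        omega

theorem aWhile_char : ∀ (k : Nat) (n : Int) (x : Nat), (n - formula x).toNat ≤ k →
    (∀ x', aWhile n x = some x' → x ≤ x' ∧ formula x' = n) ∧
    (aWhile n x = none → ∀ j, x ≤ j → formula j ≠ n) := by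
  intro k
  induction k with
  | zero =>
    intro n x hk
    have hle : n ≤ formula x := by omega
    rw [aWhile]
    by_cases he : formula x = n
    · simp only [if_pos he]
      refine ⟨fun x' hx' => ?_, fun h => by simp at h⟩
      · injection hx' with h'; subst h'; exact ⟨le_refl x, he⟩
    · have hgt : formula x > n := by omega
      simp only [if_neg he, if_pos hgt]
      refine ⟨fun x' hx' => by simp at hx', fun _ j hj hc => ?_⟩
      have := formula_strictMono.monotone hj
      omega
  | succ k ih =>
    intro n x hk
    rw [aWhile]
    by_cases he : formula x = n
    · simp only [if_pos he]
      refine ⟨fun x' hx' => ?_, fun h => by simp at h⟩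
      · injection hx' with h'; subst h'; exact ⟨le_refl x, he⟩
    · simp only [if_neg he]
      by_cases hgt : formula x > n
      · simp only [if_pos hgt]
        refine ⟨fun x' hx' => by simp at hx', fun _ j hj hc => ?_⟩
        have := formula_strictMono.monotone hj
        omega
      · simp only [if_neg hgt]
        have hk' : (n - formula (x + 1)).toNat ≤ k := by
          have := formula_lt_succ x; omega
        obtain ⟨hsome, hnone⟩ := ih n (x + 1) hk'
        refine ⟨fun x' hx' => ?_, fun h j hj hc => ?_⟩
        · obtain ⟨h1, h2⟩ := hsome x' hx'
          exact ⟨by omega, h2⟩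
        · rcases Nat.eq_or_lt_of_le hj with rfl | hlt
          · omega
          · exact hnone h j hlt hc

theorem aScan_iff : ∀ (l : List Int) (x : Nat), l.Pairwise (· ≤ ·) →
    (aScan l x = true ↔ ∀ n ∈ l, ∃ j, x ≤ j ∧ formula j = n) := by
  intro l
  induction l with
  | nil => intro x _; simp [aScan]
  | cons n rest ih =>
    intro x hp
    have hchar := aWhile_char (n - formula x).toNat n x (le_refl _)
    rw [aScan]
    rcases hw : aWhile n x with _ | x'
    · simp only [Bool.false_eq_true, false_iff]
      intro hall
      obtain ⟨j, hj, he⟩ := hall n (by simp)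
      exact hchar.2 hw j hj he
    · obtain ⟨hx, hfx⟩ := hchar.1 x' hw
      rw [ih x' (List.Pairwise.of_cons hp)]
      have hhead : ∀ m ∈ rest, n ≤ m := (List.pairwise_cons.mp hp).1
      constructor
      · intro hrest m hm
        rcases List.mem_cons.mp hm with rfl | hm'
        · exact ⟨x', hx, hfx⟩
        · obtain ⟨j, hj, he⟩ := hrest m hm'
          exact ⟨j, le_trans hx hj, he⟩
      · intro hall m hm
        obtain ⟨j, hj, he⟩ := hall m (List.mem_cons_of_mem _ hm)
        have hge : formula x' ≤ formula j := by rw [hfx, he]; exact hhead m hm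
        exact ⟨j, formula_strictMono.le_iff_le.mp hge, he⟩

theorem alt_iff (lst : List Int) :
    is_part_of_series_alt lst = true ↔ ∀ n ∈ lst, ∃ j, formula j = n := by
  unfold is_part_of_series_alt
  rw [List.all_eq_true]
  constructor
  · intro h n hn
    have hb := h n hn
    rw [bLoop_congr n 0 (formula 0) 1 (formula 1) (by norm_num) (by norm_num)
          (formula_inv 0).1 (formula_inv 0).2 rfl rfl] at hb
    obtain ⟨j, _, he⟩ := (bLoop_iff (n - formula 0).toNat n 0 (le_refl _)).mp hb
    exact ⟨j, he⟩
  · intro h n hn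
    obtain ⟨j, he⟩ := h n hn
    rw [bLoop_congr n 0 (formula 0) 1 (formula 1) (by norm_num) (by norm_num)
          (formula_inv 0).1 (formula_inv 0).2 rfl rfl]
    exact (bLoop_iff (n - formula 0).toNat n 0 (le_refl _)).mpr ⟨j, Nat.zero_le j, he⟩

theorem a_iff (lst : List Int) :
    is_part_of_series lst = true ↔ ∀ n ∈ lst, ∃ j, formula j = n := by
  unfold is_part_of_series
  rw [aScan_iff _ 0 (PySem.List.sorted_pairwise lst (fun v => v) )]
  constructor
  · intro h n hn
    obtain ⟨j, _, he⟩ := h n ((PySem.List.mem_sorted _ _ _ _).mpr hn)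
    exact ⟨j, he⟩
  · intro h n hn
    obtain ⟨j, he⟩ := h n ((PySem.List.mem_sorted _ _ _ _).mp hn)
    exact ⟨j, Nat.zero_le j, he⟩

-- ===== VERDICT (by name: the statement is the Claim_ definition above) =====
theorem is_part_of_series_spec : Claim_equal_is_part_of_series := by
  intro lst _
  unfold Spec_is_part_of_series
  exact Bool.eq_iff_iff.mpr ((a_iff lst).trans (alt_iff lst).symm)
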